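-- pv_equiv track=rewrite | github.com/hnrm110901-cell/zhilian-os | apps/api-gateway/src/services/hr/knowledge_service.py | validate_skill_order
-- ===== SOURCE A (Python) =====
-- def validate_skill_order(
--     skill_graph: dict[str, list[str]],
--     achieved_order: list[str],
-- ) -> tuple[bool, list[str]]:
--     """验证技能学习顺序是否满足前置依赖（纯函数，无DB依赖）。
--
--     使用拓扑排序验证：每个已学技能的所有前置技能必须在它之前出现。
--
--     Args:
--         skill_graph: {skill_id: [prerequisite_skill_ids]} 邻接表
--         achieved_order: 技能学习顺序 [先学的, ..., 后学的]
--
--     Returns: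
--         (is_valid, violations) — violations 格式: ["skill_X 缺少前置 skill_Y"]
--     """
--     achieved_set: set[str] = set()
--     violations: list[str] = []
--
--     for skill_id in achieved_order:
--         prereqs = skill_graph.get(skill_id, [])
--         for prereq in prereqs:
--             if prereq not in achieved_set:
--                 violations.append(f"{skill_id} 缺少前置 {prereq}")
--         achieved_set.add(skill_id)
--
--     return (len(violations) == 0, violations)
-- ===== SOURCE B (Python) =====
-- def validate_skill_order(
--     skill_graph: dict[str, list[str]],
--     achieved_order: list[str],
-- ) -> tuple[bool, list[str]]:
--     """Mergesort-style divide-and-conquer: each half reports its skill set and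
--     its still-unresolved (skill, prereq) pairs; a merge resolves the right
--     half's pairs against the left half's set; pairs surviving to the top are
--     exactly the violations, in occurrence order."""
--     def solve(segment: list[str]) -> tuple[set[str], list[tuple[str, str]]]:
--         # segment is never empty
--         if len(segment) == 1:
--             s = segment[0]
--             return ({s}, [(s, p) for p in skill_graph.get(s, [])])
--         mid = len(segment) // 2
--         lset, lpend = solve(segment[:mid])
--         rset, rpend = solve(segment[mid:])
--         return (lset | rset, lpend + [pr for pr in rpend if pr[1] not in lset])
--
--     if not achieved_order:
--         return (True, [])
--     _, pending = solve(achieved_order)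
--     violations = [f"{s} 缺少前置 {p}" for s, p in pending]
--     return (not pending, violations)
-- ===== Notes on version B (the rewrite author's own statement) =====
-- stated objective: alternative
-- what changed: B replaces A's single stateful pass with a growing seen-set by a mergesort-style divide-and-conquer: each half returns its skill set and its unresolved (skill, prereq) pairs, the merge filters the right half's pairs against the left half's set, and the pairs that survive to the root are the violations; correct because the union of left siblings along a leaf's path is exactly the strict prefix before that position.
import Mathlib
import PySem

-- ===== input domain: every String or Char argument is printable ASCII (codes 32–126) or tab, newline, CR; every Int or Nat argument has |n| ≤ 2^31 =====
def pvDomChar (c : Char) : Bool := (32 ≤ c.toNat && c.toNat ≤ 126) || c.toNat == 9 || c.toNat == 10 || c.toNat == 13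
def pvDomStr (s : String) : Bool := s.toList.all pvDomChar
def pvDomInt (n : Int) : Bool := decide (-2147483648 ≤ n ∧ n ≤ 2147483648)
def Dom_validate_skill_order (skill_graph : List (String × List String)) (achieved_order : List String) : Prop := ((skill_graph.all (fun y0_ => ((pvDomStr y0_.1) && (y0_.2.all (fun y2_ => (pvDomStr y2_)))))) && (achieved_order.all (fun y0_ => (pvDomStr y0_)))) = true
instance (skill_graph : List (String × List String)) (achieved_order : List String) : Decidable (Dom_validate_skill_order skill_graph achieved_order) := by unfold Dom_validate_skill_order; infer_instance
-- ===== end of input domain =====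

-- B replaces A's stateful left-to-right pass (growing seen-set) by a mergesort-style
-- divide-and-conquer that resolves right-half prerequisite pairs against the left
-- half's skill set; alternative decomposition, same results.

-- ===== PORT A =====
-- loop body of A's 'for skill_id in achieved_order' (the state is (achieved_set, violations))
def pvStepA (skill_graph : List (String × List String)) (st : PySem.Set String × List String) (skill_id : String) : PySem.Set String × List String :=
  let prereqs := PySem.Dict.getD ⟨skill_graph⟩ skill_id []
  let violations := prereqs.foldl
    (fun acc prereq =>
      if !(PySem.Set.contains st.1 prereq) then acc ++ [skill_id ++ " 缺少前置 " ++ prereq] else acc)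
    st.2
  (PySem.Set.add st.1 skill_id, violations)

def validate_skill_order (skill_graph : List (String × List String)) (achieved_order : List String) : Bool × List String :=
  let st := achieved_order.foldl (pvStepA skill_graph) (PySem.Set.empty, [])
  (st.2.length == 0, st.2)

-- ===== PORT B =====
-- Source B's inner 'solve(segment)': Python's nonnegative slices segment[:mid]/segment[mid:]
-- are exactly List.take/List.drop, and len(segment)//2 on a nonnegative length is Nat
-- division. solve is only ever called on nonempty segments ([] branch unreachable); the
-- fuel parameter (= the initial segment length) is only a structural-termination guard:
-- with fuel ≥ segment length the 0-fuel branch is never reached.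
def pvSolve (skill_graph : List (String × List String)) : Nat → List String → PySem.Set String × List (String × String)
  | _, [] => (PySem.Set.empty, [])
  | _, [s] => (PySem.Set.ofList [s], (PySem.Dict.getD ⟨skill_graph⟩ s []).map (fun p => (s, p)))
  | 0, _ :: _ :: _ => (PySem.Set.empty, [])
  | fuel + 1, s1 :: s2 :: rest =>
      let seg := s1 :: s2 :: rest
      let mid := seg.length / 2
      let l := pvSolve skill_graph fuel (seg.take mid)
      let r := pvSolve skill_graph fuel (seg.drop mid)
      (PySem.Set.union l.1 r.1,
        l.2 ++ r.2.filter (fun pr => !(PySem.Set.contains l.1 pr.2)))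

def validate_skill_order_alt (skill_graph : List (String × List String)) (achieved_order : List String) : Bool × List String :=
  if achieved_order.isEmpty then (true, [])
  else
    let pending := (pvSolve skill_graph achieved_order.length achieved_order).2
    let violations := pending.map (fun pr => pr.1 ++ " 缺少前置 " ++ pr.2)
    (pending.isEmpty, violations)

-- ===== PRECONDITION & SPEC =====
def Spec_validate_skill_order (skill_graph : List (String × List String)) (achieved_order : List String) (out : Bool × List String) : Prop := out = validate_skill_order_alt skill_graph achieved_order
instance (skill_graph : List (String × List String)) (achieved_order : List String) (out : Bool × List String) : Decidable (Spec_validate_skill_order skill_graph achieved_order out) := by unfold Spec_validate_skill_order; infer_instance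

-- ===== CLAIM =====
def Claim_equal_validate_skill_order : Prop := ∀ (skill_graph : List (String × List String)) (achieved_order : List String), Dom_validate_skill_order skill_graph achieved_order → Spec_validate_skill_order skill_graph achieved_order (validate_skill_order skill_graph achieved_order)

-- ===== LEMMAS AND PROOFS =====

-- the linear (left-to-right) reference: unresolved (skill, prereq) pairs of seg after context
def pvPend (g : List (String × List String)) (earlier : List String) : List String → List (String × String)
  | [] => []
  | x :: xs =>
      (PySem.Dict.getD ⟨g⟩ x []).filterMap (fun p => if p ∈ earlier then none else some (x, p))
        ++ pvPend g (earlier ++ [x]) xs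

theorem pvPend_congr (g : List (String × List String)) :
    ∀ seg e e', (∀ p : String, p ∈ e ↔ p ∈ e') → pvPend g e seg = pvPend g e' seg := by
  intro seg
  induction seg with
  | nil => intro e e' _; rfl
  | cons x xs ih =>
    intro e e' h
    simp only [pvPend]
    congr 1
    · apply List.filterMap_congr
      intro q _
      by_cases hq : q ∈ e
      · rw [if_pos hq, if_pos ((h q).mp hq)]
      · rw [if_neg hq, if_neg (fun hc => hq ((h q).mpr hc))]
    · exact ih (e ++ [x]) (e' ++ [x]) (by intro p; simp [h p])

theorem pvPend_append (g : List (String × List String)) (l r : List String) :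
    ∀ e, pvPend g e (l ++ r) = pvPend g e l ++ pvPend g (e ++ l) r := by
  induction l with
  | nil => intro e; simp [pvPend]
  | cons x xs ih =>
    intro e
    simp only [List.cons_append, pvPend, ih (e ++ [x]), List.append_assoc, List.nil_append]

theorem pvPend_filter (g : List (String × List String)) (r : List String) :
    ∀ e l, pvPend g (e ++ l) r = (pvPend g e r).filter (fun pr => !decide (pr.2 ∈ l)) := by
  induction r with
  | nil => intro e l; rfl
  | cons x xs ih =>
    intro e l
    simp only [pvPend, List.filter_append]
    congr 1
    · rw [List.filter_filterMap]
      apply List.filterMap_congr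
      intro q _
      by_cases hqe : q ∈ e <;> by_cases hql : q ∈ l <;>
        simp [hqe, hql, Option.filter]
    · rw [pvPend_congr g xs ((e ++ l) ++ [x]) ((e ++ [x]) ++ l) (by intro p; simp; tauto)]
      exact ih (e ++ [x]) l

-- the divide-and-conquer solve meets the linear reference on every nonempty segment
theorem pvSolve_spec (g : List (String × List String)) :
    ∀ n seg, seg.length ≤ n → seg ≠ [] →
      (∀ y : String, y ∈ (pvSolve g n seg).1 ↔ y ∈ seg) ∧
        (pvSolve g n seg).2 = pvPend g [] seg := by
  intro n
  induction n with
  | zero =>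
    intro seg hlen hne
    exact absurd (List.length_eq_zero_iff.mp (Nat.le_zero.mp hlen)) hne
  | succ n ih =>
    intro seg hlen hne
    match seg with
    | [] => exact absurd rfl hne
    | [s] =>
      constructor
      · intro y; simp [pvSolve, PySem.Set.mem_ofList]
      · simp [pvSolve, pvPend]
    | s1 :: s2 :: rest =>
      rw [show pvSolve g (n + 1) (s1 :: s2 :: rest)
            = (let seg := s1 :: s2 :: rest
               let mid := seg.length / 2
               let l := pvSolve g n (seg.take mid)
               let r := pvSolve g n (seg.drop mid)
               (PySem.Set.union l.1 r.1,
                 l.2 ++ r.2.filter (fun pr => !(PySem.Set.contains l.1 pr.2)))) from rfl]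
      have hlen2 : (s1 :: s2 :: rest).length = rest.length + 2 := by simp
      set seg := s1 :: s2 :: rest with hsegdef
      set mid := seg.length / 2 with hmid
      have hm1 : 1 ≤ mid := by rw [hmid, hlen2]; omega
      have hmlt : mid < seg.length := by rw [hmid, hlen2]; omega
      have htl : (seg.take mid).length ≤ n := by rw [List.length_take]; omega
      have hdl : (seg.drop mid).length ≤ n := by rw [List.length_drop]; omega
      have htne : seg.take mid ≠ [] := by
        intro h; have := congrArg List.length h
        rw [List.length_take] at this; simp at this; omega
      have hdne : seg.drop mid ≠ [] := by
        intro h; have := congrArg List.length h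
        rw [List.length_drop] at this; simp at this; omega
      obtain ⟨ihl1, ihl2⟩ := ih (seg.take mid) htl htne
      obtain ⟨ihr1, ihr2⟩ := ih (seg.drop mid) hdl hdne
      constructor
      · intro y
        rw [PySem.Set.mem_union, ihl1 y, ihr1 y, ← List.mem_append, List.take_append_drop]
      · simp only
        rw [ihl2, ihr2]
        have hfc : (pvSolve g n (seg.drop mid)).2.filter (fun pr => !(PySem.Set.contains (pvSolve g n (seg.take mid)).1 pr.2))
            = (pvPend g [] (seg.drop mid)).filter (fun pr => !decide (pr.2 ∈ seg.take mid)) := by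
          rw [ihr2]
          apply List.filter_congr
          intro pr _
          have hmem : (pr.2 ∈ (pvSolve g n (seg.take mid)).1) ↔ pr.2 ∈ seg.take mid := ihl1 pr.2
          simp [hmem]
        rw [ihr2] at hfc
        rw [hfc, ← pvPend_filter g (seg.drop mid) [] (seg.take mid)]
        rw [← pvPend_append g (seg.take mid) (seg.drop mid) []]
        rw [List.take_append_drop]

-- A's fold: the set is the processed skills, the list is the rendered linear reference
theorem pvFoldA_spec (g : List (String × List String)) :
    ∀ seg pre v, seg.foldl (pvStepA g) (PySem.Set.ofList pre, v)
      = (PySem.Set.ofList (pre ++ seg),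
         v ++ (pvPend g pre seg).map (fun pr => pr.1 ++ " 缺少前置 " ++ pr.2)) := by
  intro seg
  induction seg with
  | nil => intro pre v; simp [pvPend]
  | cons x xs ih =>
    intro pre v
    have hstep : pvStepA g (PySem.Set.ofList pre, v) x
        = (PySem.Set.ofList (pre ++ [x]),
           v ++ ((PySem.Dict.getD ⟨g⟩ x []).filterMap
             (fun p => if p ∈ pre then none else some (x, p))).map
               (fun pr => pr.1 ++ " 缺少前置 " ++ pr.2)) := by
      unfold pvStepA
      refine Prod.ext ?_ ?_
      · exact (PySem.Set.ofList_append_singleton pre x).symm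
      · simp only
        rw [PySem.List.foldl_append_if (fun q => !(PySem.Set.contains (PySem.Set.ofList pre) q))
          (fun q => x ++ " 缺少前置 " ++ q), ← List.filterMap_eq_map, List.filterMap_filter]
        rw [List.map_filterMap]
        congr 1
        apply List.filterMap_congr
        intro q _
        by_cases hq : q ∈ pre
        · simp [hq]
        · simp [hq]
    rw [List.foldl_cons, hstep, ih (pre ++ [x])]
    simp [pvPend, List.append_assoc]

-- ===== VERDICT =====
theorem validate_skill_order_spec : Claim_equal_validate_skill_order := by
  intro g order _
  unfold Spec_validate_skill_order validate_skill_order validate_skill_order_alt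
  have h0 : (PySem.Set.empty : PySem.Set String) = PySem.Set.ofList [] := rfl
  rw [h0, pvFoldA_spec g order [] []]
  match order with
  | [] => simp [pvPend]
  | o1 :: os =>
    rw [if_neg (by simp)]
    obtain ⟨-, h2⟩ := pvSolve_spec g (o1 :: os).length (o1 :: os) le_rfl (by simp)
    rw [h2]
    simp only [List.nil_append]
    cases pvPend g [] (o1 :: os) <;> simp
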